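-- pv_equiv track=rewrite | github.com/N3koSempai/bot-telegram-lotery-python | connection_DB.py | parlecombine
-- ===== SOURCE A (Python) =====
-- def parlecombine(lista):
--     """para combinaciones de parle"""
--     temp = ""
--     parles = []
--     templist = lista.copy()
--
--     for i in lista:
--         temp = str(i)
--
--         for x in templist:
--             if x != i:
--                 temp = temp +"." + str(x)
--                 parles.append(temp)
--                 temp = str(i)
--
--
--         templist.remove(i)
--
--     return parles
-- ===== SOURCE B (Python) =====
-- def parlecombine(lista):
--     """para combinaciones de parle"""
--     # Recurse on suffixes: pair each head with every later element of
--     # different value. No copied/mutated auxiliary list is needed.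
--     out = []
--     rest = lista
--     while rest:
--         head, rest = rest[0], rest[1:]
--         out.extend(f"{head}.{x}" for x in rest if x != head)
--     return out
-- ===== Notes on version B (the rewrite author's own statement) =====
-- stated objective: simpler
-- what changed: B drops A's copied-and-mutated templist (copy/remove bookkeeping) and instead walks the suffixes directly, pairing each head with the later elements of different value in one filtered pass.
import Mathlib
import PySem

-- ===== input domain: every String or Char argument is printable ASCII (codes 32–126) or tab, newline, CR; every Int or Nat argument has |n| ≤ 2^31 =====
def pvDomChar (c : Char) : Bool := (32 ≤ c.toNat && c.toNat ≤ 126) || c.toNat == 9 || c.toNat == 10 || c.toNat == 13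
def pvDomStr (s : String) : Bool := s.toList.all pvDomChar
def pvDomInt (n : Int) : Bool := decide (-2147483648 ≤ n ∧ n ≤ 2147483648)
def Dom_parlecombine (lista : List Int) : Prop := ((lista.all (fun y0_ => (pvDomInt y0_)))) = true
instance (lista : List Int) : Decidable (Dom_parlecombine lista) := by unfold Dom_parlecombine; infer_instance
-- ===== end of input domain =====

-- B replaces A's copied-and-mutated auxiliary list with a direct walk over the suffixes (objective: simpler).


-- ===== PORT A =====
-- 'templist.remove(i)' never raises here (i was just drawn from templist's head, see the proofs
-- below), so the ValueError branch of remove? is unreachable; getD keeps the port total.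
def parlecombine (lista : List Int) : List String :=
  (lista.foldl
    (fun (st : List Int × List String) i =>
      let parles := st.1.foldl
        (fun acc x =>
          if x ≠ i then acc ++ [PySem.Int.toStr i ++ "." ++ PySem.Int.toStr x] else acc)
        st.2
      ((PySem.List.remove? st.1 i).getD st.1, parles))
    (lista, ([] : List String))).2

-- ===== PORT B =====
def parlecombine_alt : List Int → List String
  | [] => []
  | h :: t =>
      ((t.filter (fun x => x ≠ h)).map
        (fun x => PySem.Int.toStr h ++ "." ++ PySem.Int.toStr x)) ++ parlecombine_alt t

-- ===== PRECONDITION & SPEC =====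
def Spec_parlecombine (lista : List Int) (out : List String) : Prop := out = parlecombine_alt lista
instance (lista : List Int) (out : List String) : Decidable (Spec_parlecombine lista out) := by unfold Spec_parlecombine; infer_instance

-- ===== CLAIM (what is proved, stated in full; the proofs are below) =====
def Claim_equal_parlecombine : Prop := ∀ (lista : List Int), Dom_parlecombine lista → Spec_parlecombine lista (parlecombine lista)

-- ===== LEMMAS AND PROOFS =====

theorem pc_inner (f : Int → String) (h : Int) (t : List Int) (acc : List String) :
    t.foldl (fun acc x => if x ≠ h then acc ++ [f x] else acc) acc
      = acc ++ ((t.filter (fun x => x ≠ h)).map f) := by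
  induction t generalizing acc with
  | nil => simp
  | cons y ys ih =>
      simp only [List.foldl_cons, List.filter_cons]
      by_cases hy : y ≠ h
      · rw [if_pos hy, ih]; simp [hy]
      · rw [if_neg hy, ih]; simp [hy]

-- the loop invariant: templist is always exactly the remaining suffix of lista
theorem parlecombine_loop (l : List Int) (acc : List String) :
    (l.foldl
      (fun (st : List Int × List String) i =>
        let parles := st.1.foldl
          (fun acc x =>
            if x ≠ i then acc ++ [PySem.Int.toStr i ++ "." ++ PySem.Int.toStr x] else acc)
          st.2
        ((PySem.List.remove? st.1 i).getD st.1, parles))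
      (l, acc)).2 = acc ++ parlecombine_alt l := by
  induction l generalizing acc with
  | nil => simp [parlecombine_alt]
  | cons h t ih =>
      simp only [List.foldl_cons, PySem.List.remove?_cons_self, Option.getD_some,
        if_neg (show ¬ h ≠ h from fun hc => hc rfl)]
      rw [pc_inner, ih]
      simp [parlecombine_alt]

-- ===== VERDICT (by name: the statement is the Claim_ definition above) =====
theorem parlecombine_spec : Claim_equal_parlecombine := by
  intro lista _
  unfold Spec_parlecombine parlecombine
  simpa using parlecombine_loop lista []
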